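-- pv_equiv track=rewrite | github.com/PythWare/Aldnoah-Engine | Aldnoah_Logic/aldnoah_unpack.py | infer_relpair_alignment_from_original
-- ===== SOURCE A (Python) =====
-- def infer_relpair_alignment_from_original(entries: list[tuple[int, int, int]]) -> int:
--     positive_rels = [rel for rel, sz, _abs_off in entries if sz > 0]
--     if not positive_rels:
--         return 4
--     for alignment in (64, 32, 16, 8, 4):
--         if all(rel % alignment == 0 for rel in positive_rels):
--             return alignment
--     return 4
-- ===== SOURCE B (Python) =====
-- def _gcd(a, b):
--     return a if b == 0 else _gcd(b, a % b)
--
--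
-- def infer_relpair_alignment_from_original(entries: list[tuple[int, int, int]]) -> int:
--     g = 0
--     found = False
--     for rel, sz, _abs_off in entries:
--         if sz > 0:
--             g = _gcd(abs(g), abs(rel))
--             found = True
--     if not found:
--         return 4
--     for alignment in (64, 32, 16, 8, 4):
--         if g % alignment == 0:
--             return alignment
--     return 4
-- ===== Notes on version B (the rewrite author's own statement) =====
-- stated objective: alternative
-- what changed: Instead of re-scanning every positive rel for each candidate alignment, B folds a single running gcd over the positive rels and then tests the five alignments against that one number.
import Mathlib
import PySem

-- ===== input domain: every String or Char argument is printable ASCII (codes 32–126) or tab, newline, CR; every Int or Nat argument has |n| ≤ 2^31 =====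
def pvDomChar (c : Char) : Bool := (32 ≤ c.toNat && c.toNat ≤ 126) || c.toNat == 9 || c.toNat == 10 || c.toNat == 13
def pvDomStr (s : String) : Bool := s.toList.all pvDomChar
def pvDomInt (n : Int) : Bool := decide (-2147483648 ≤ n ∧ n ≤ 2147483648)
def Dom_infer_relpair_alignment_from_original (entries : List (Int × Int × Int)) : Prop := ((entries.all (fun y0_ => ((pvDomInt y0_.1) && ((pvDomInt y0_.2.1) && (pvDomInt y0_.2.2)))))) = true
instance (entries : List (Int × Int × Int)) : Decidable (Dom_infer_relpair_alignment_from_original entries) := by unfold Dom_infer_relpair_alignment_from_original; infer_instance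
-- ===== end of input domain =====

-- B replaces A's "try each alignment against every positive rel" with a single gcd fold over
-- the positive rels, then tests the five alignments against that one gcd (alternative algorithm).

-- ===== PORT A =====
-- the for-loop over (64, 32, 16, 8, 4) with its all(...) test
def pvLoopA (rels : List Int) : List Int → Int
  | [] => 4
  | a :: rest => if rels.all (fun rel => PySem.Int.mod rel a == 0) then a else pvLoopA rels rest

def infer_relpair_alignment_from_original (entries : List (Int × Int × Int)) : Int :=
  let positive_rels := (entries.filter (fun e => decide (e.2.1 > 0))).map (fun e => e.1)
  if positive_rels = [] then 4
  else pvLoopA positive_rels [64, 32, 16, 8, 4]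

-- ===== PORT B =====
-- Source B's recursive Euclid helper _gcd on nonnegative arguments
def pvGcd (a b : Nat) : Nat :=
  if h : b = 0 then a else pvGcd b (a % b)
termination_by b
decreasing_by exact Nat.mod_lt _ (Nat.pos_of_ne_zero h)

-- the for-loop over (64, 32, 16, 8, 4) testing the accumulated gcd
def pvLoopB (g : Int) : List Int → Int
  | [] => 4
  | a :: rest => if PySem.Int.mod g a == 0 then a else pvLoopB g rest

def infer_relpair_alignment_from_original_alt (entries : List (Int × Int × Int)) : Int :=
  let st := entries.foldl
    (fun (st : Int × Bool) e =>
      if e.2.1 > 0 then (((pvGcd st.1.natAbs e.1.natAbs : Nat) : Int), true) else st)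
    (0, false)
  if st.2 = false then 4
  else pvLoopB st.1 [64, 32, 16, 8, 4]

-- ===== PRECONDITION & SPEC =====
def Spec_infer_relpair_alignment_from_original (entries : List (Int × Int × Int)) (out : Int) : Prop := out = infer_relpair_alignment_from_original_alt entries
instance (entries : List (Int × Int × Int)) (out : Int) : Decidable (Spec_infer_relpair_alignment_from_original entries out) := by unfold Spec_infer_relpair_alignment_from_original; infer_instance

-- ===== CLAIM (what is proved, stated in full; the proofs are below) =====
def Claim_equal_infer_relpair_alignment_from_original : Prop := ∀ (entries : List (Int × Int × Int)), Dom_infer_relpair_alignment_from_original entries → Spec_infer_relpair_alignment_from_original entries (infer_relpair_alignment_from_original entries)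

-- ===== LEMMAS AND PROOFS =====

theorem pvGcd_eq_gcd (a b : Nat) : pvGcd a b = Nat.gcd a b := by
  induction b using Nat.strong_induction_on generalizing a with
  | _ b ih =>
    rw [pvGcd]
    by_cases h : b = 0
    · simp [h]
    · rw [dif_neg h, ih (a % b) (Nat.mod_lt _ (Nat.pos_of_ne_zero h)) b]
      conv_rhs => rw [Nat.gcd_comm a b, Nat.gcd_rec b a]
      exact Nat.gcd_comm _ _

-- divisibility through one gcd step
theorem dvd_gcd_step (m g r : Int) :
    m ∣ ((pvGcd g.natAbs r.natAbs : Nat) : Int) ↔ m ∣ g ∧ m ∣ r := by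
  rw [pvGcd_eq_gcd]
  show m ∣ ((Int.gcd g r : Nat) : Int) ↔ _
  constructor
  · intro h
    exact ⟨h.trans (Int.gcd_dvd_left g r), h.trans (Int.gcd_dvd_right g r)⟩
  · rintro ⟨hg, hr⟩
    exact Int.natAbs_dvd.mp (Int.natCast_dvd_natCast.mpr
      (Nat.dvd_gcd (Int.natAbs_dvd_natAbs.mpr hg) (Int.natAbs_dvd_natAbs.mpr hr)))

-- the fold invariant: the flag records whether a positive-size entry was seen,
-- and divisors of the accumulator are exactly the common divisors of init and all positive rels
theorem fold_invariant (entries : List (Int × Int × Int)) (g0 : Int) (f0 : Bool) :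
    (entries.foldl
      (fun (st : Int × Bool) e =>
        if e.2.1 > 0 then (((pvGcd st.1.natAbs e.1.natAbs : Nat) : Int), true) else st)
      (g0, f0)).2 = (f0 || entries.any (fun e => decide (e.2.1 > 0))) ∧
    ∀ m : Int,
      (m ∣ (entries.foldl
        (fun (st : Int × Bool) e =>
          if e.2.1 > 0 then (((pvGcd st.1.natAbs e.1.natAbs : Nat) : Int), true) else st)
        (g0, f0)).1 ↔ (m ∣ g0 ∧ ∀ e ∈ entries, e.2.1 > 0 → m ∣ e.1)) := by
  induction entries generalizing g0 f0 with
  | nil => simp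
  | cons e rest ih =>
    by_cases h : e.2.1 > 0
    · simp only [List.foldl_cons, if_pos h]
      obtain ⟨h1, h2⟩ := ih ((pvGcd g0.natAbs e.1.natAbs : Nat) : Int) true
      refine ⟨by simp [h1, h], ?_⟩
      intro m
      rw [h2 m, dvd_gcd_step]
      constructor
      · rintro ⟨⟨hg, he⟩, hrest⟩
        exact ⟨hg, by intro x hx _; rcases List.mem_cons.mp hx with hx | hx; · subst hx; exact he
                      · exact hrest x hx ‹_›⟩
      · rintro ⟨hg, hall⟩
        exact ⟨⟨hg, hall e (List.mem_cons_self) h⟩,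
               fun x hx hp => hall x (List.mem_cons_of_mem _ hx) hp⟩
    · simp only [List.foldl_cons, if_neg h]
      obtain ⟨h1, h2⟩ := ih g0 f0
      refine ⟨by simpa [h] using h1, ?_⟩
      intro m
      rw [h2 m]
      constructor
      · rintro ⟨hg, hrest⟩
        exact ⟨hg, by intro x hx hp; rcases List.mem_cons.mp hx with hx | hx; · subst hx; exact absurd hp h
                      · exact hrest x hx hp⟩
      · rintro ⟨hg, hall⟩
        exact ⟨hg, fun x hx hp => hall x (List.mem_cons_of_mem _ hx) hp⟩

-- the two alignment loops agree whenever their tests agree on every positive alignment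
theorem loops_eq (rels : List Int) (g : Int) (aligns : List Int)
    (h : ∀ a ∈ aligns, 0 < a →
      ((rels.all (fun rel => PySem.Int.mod rel a == 0)) = (PySem.Int.mod g a == 0)))
    (hpos : ∀ a ∈ aligns, 0 < a) :
    pvLoopA rels aligns = pvLoopB g aligns := by
  induction aligns with
  | nil => rfl
  | cons a rest ih =>
    simp only [pvLoopA, pvLoopB]
    rw [h a (List.mem_cons_self) (hpos a List.mem_cons_self)]
    split
    · rfl
    · exact ih (fun x hx => h x (List.mem_cons_of_mem _ hx))
        (fun x hx => hpos x (List.mem_cons_of_mem _ hx))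

theorem all_mod_eq (rels : List Int) (a : Int) :
    (rels.all (fun rel => PySem.Int.mod rel a == 0)) = true ↔ ∀ r ∈ rels, a ∣ r := by
  simp [List.all_eq_true, PySem.Int.mod_eq_zero_iff_dvd]

-- ===== VERDICT (by name: the statement is the Claim_ definition above) =====
theorem infer_relpair_alignment_from_original_spec : Claim_equal_infer_relpair_alignment_from_original := by
  intro entries _
  unfold Spec_infer_relpair_alignment_from_original
  unfold infer_relpair_alignment_from_original infer_relpair_alignment_from_original_alt
  simp only []
  obtain ⟨hflag, hdvd⟩ := fold_invariant entries 0 false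
  set st := entries.foldl
      (fun (st : Int × Bool) e =>
        if e.2.1 > 0 then (((pvGcd st.1.natAbs e.1.natAbs : Nat) : Int), true) else st)
      (0, false) with hst
  have hmem : ∀ r, r ∈ (entries.filter (fun e => decide (e.2.1 > 0))).map (fun e => e.1) ↔
      ∃ e ∈ entries, e.2.1 > 0 ∧ e.1 = r := by
    intro r; simp [List.mem_map, List.mem_filter, and_assoc]
  by_cases hempty : (entries.filter (fun e => decide (e.2.1 > 0))).map (fun e => e.1) = []
  · -- no positive entry: both return 4
    have hany : entries.any (fun e => decide (e.2.1 > 0)) = false := by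
      by_contra hne
      rw [Bool.not_eq_false, List.any_eq_true] at hne
      obtain ⟨e, he, hp⟩ := hne
      have : e.1 ∈ (entries.filter (fun e => decide (e.2.1 > 0))).map (fun e => e.1) := by
        rw [hmem]; exact ⟨e, he, by simpa using hp, rfl⟩
      simp [hempty] at this
    rw [if_pos hempty, if_pos (by simp [hflag, hany])]
  · rw [if_neg hempty]
    have hany : entries.any (fun e => decide (e.2.1 > 0)) = true := by
      by_contra hne
      apply hempty
      rw [Bool.not_eq_true, List.any_eq_false] at hne
      rw [List.eq_nil_iff_forall_not_mem]
      intro r hr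
      rw [hmem] at hr
      obtain ⟨e, he, hp, _⟩ := hr
      exact hne e he (decide_eq_true hp)
    rw [if_neg (by simp [hflag, hany])]
    apply loops_eq
    · intro a _ hapos
      have key : (∀ r ∈ (entries.filter (fun e => decide (e.2.1 > 0))).map (fun e => e.1), a ∣ r)
          ↔ a ∣ st.1 := by
        rw [hdvd a]
        constructor
        · intro h
          exact ⟨dvd_zero a, fun e he hp => h e.1 ((hmem e.1).mpr ⟨e, he, hp, rfl⟩)⟩
        · rintro ⟨_, h⟩ r hr
          obtain ⟨e, he, hp, hre⟩ := (hmem r).mp hr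
          exact hre ▸ h e he hp
      rw [Bool.eq_iff_iff, all_mod_eq, beq_iff_eq, PySem.Int.mod_eq_zero_iff_dvd]
      exact key
    · intro a ha
      fin_cases ha <;> norm_num
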